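-- pv_equiv track=rewrite | github.com/AXEG0/tic-tac-toe | main.py | diagonal_check
-- ===== SOURCE A (Python) =====
-- def diagonal_check(var, m_list):
--     num = 0
--     res = set()
--     while num < len(m_list):
--         res.add(m_list[num][num])
--         num += 1
--     if res == {var}:
--         return True
-- ===== SOURCE B (Python) =====
-- def diagonal_check(var, m_list):
--     def match_from(rows, i):
--         if not rows:
--             return True
--         return rows[0][i] == var and match_from(rows[1:], i + 1)
--
--     if m_list and match_from(m_list, 0):
--         return True
-- ===== Notes on version B (the rewrite author's own statement) =====
-- stated objective: alternative
-- what changed: Replaces the iterative while-loop that accumulates distinct diagonal values into a set and then compares that set to {var} with a structural recursion that consumes the row list, checking rows[0][i] == var with short-circuit conjunction and recursing on the tail with i+1; no set is built and a mismatch stops immediately.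
import Mathlib
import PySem

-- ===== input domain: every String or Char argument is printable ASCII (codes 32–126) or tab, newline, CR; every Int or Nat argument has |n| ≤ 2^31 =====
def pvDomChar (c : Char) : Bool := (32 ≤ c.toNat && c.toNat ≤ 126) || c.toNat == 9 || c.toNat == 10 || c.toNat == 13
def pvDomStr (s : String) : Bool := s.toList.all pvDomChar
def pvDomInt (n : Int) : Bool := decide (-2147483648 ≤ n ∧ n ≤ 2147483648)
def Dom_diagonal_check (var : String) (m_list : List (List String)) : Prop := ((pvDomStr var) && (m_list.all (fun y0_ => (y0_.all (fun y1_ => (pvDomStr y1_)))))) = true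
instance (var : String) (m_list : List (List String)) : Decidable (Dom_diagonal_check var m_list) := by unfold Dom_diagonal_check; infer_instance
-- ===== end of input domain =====

-- B replaces A's iterative collect-diagonal-into-a-set-and-compare-to-{var} loop with a
-- structural recursion on the row list (short-circuit "head's i-th cell = var and recurse"); alternative, same cost.


-- ===== PORT A =====
-- the while loop: num counts up from 0; res.add(m_list[num][num]).
-- Indexing is exact under Pre_ (every row num has length > num), where pyGetD's defaults are never used.
def pvDiagLoop (m_list : List (List String)) (num : Nat) (res : PySem.Set String) : PySem.Set String :=
  if num < m_list.length then
    pvDiagLoop m_list (num + 1)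
      (res.add (PySem.List.pyGetD (PySem.List.pyGetD m_list (num : Int) []) (num : Int) ""))
  else res
termination_by m_list.length - num

def diagonal_check (var : String) (m_list : List (List String)) : Option Bool :=
  if PySem.Set.equal (pvDiagLoop m_list 0 PySem.Set.empty) (PySem.Set.ofList [var]) then some true
  else none

-- ===== PORT B =====
-- def match_from(rows, i): if not rows: return True; return rows[0][i] == var and match_from(rows[1:], i+1)
def pvMatchFrom (var : String) (rows : List (List String)) (i : Nat) : Bool :=
  match rows with
  | [] => true
  | r :: rest => (PySem.List.pyGetD r (i : Int) "" == var) && pvMatchFrom var rest (i + 1)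

-- 'if m_list and match_from(m_list, 0): return True'
def diagonal_check_alt (var : String) (m_list : List (List String)) : Option Bool :=
  if (!m_list.isEmpty) && pvMatchFrom var m_list 0 then some true else none

-- ===== PRECONDITION & SPEC =====
-- Pre_ excludes exactly the inputs where A's m_list[num][num] raises IndexError (a row shorter than its index).
def Pre_diagonal_check (var : String) (m_list : List (List String)) : Prop :=
  ∀ p ∈ m_list.zipIdx, p.2 < p.1.length
instance (var : String) (m_list : List (List String)) : Decidable (Pre_diagonal_check var m_list) := by
  unfold Pre_diagonal_check; infer_instance
def pvWitness_diagonal_check : String × List (List String) := ("x", [["x", "o"], ["o", "x"]])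

def Spec_diagonal_check (var : String) (m_list : List (List String)) (out : Option Bool) : Prop := out = diagonal_check_alt var m_list
instance (var : String) (m_list : List (List String)) (out : Option Bool) : Decidable (Spec_diagonal_check var m_list out) := by unfold Spec_diagonal_check; infer_instance

-- ===== CLAIM (what is proved, stated in full; the proofs are below) =====
def Claim_equal_diagonal_check : Prop := ∀ (var : String) (m_list : List (List String)), Dom_diagonal_check var m_list → Pre_diagonal_check var m_list → Spec_diagonal_check var m_list (diagonal_check var m_list)

-- ===== LEMMAS AND PROOFS =====

-- membership in the set A's loop builds
lemma mem_pvDiagLoop (m_list : List (List String)) (num : Nat) (res : PySem.Set String) (y : String) :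
    y ∈ pvDiagLoop m_list num res ↔
      y ∈ res ∨ ∃ i, num ≤ i ∧ i < m_list.length ∧
        y = PySem.List.pyGetD (PySem.List.pyGetD m_list (i : Int) []) (i : Int) "" := by
  induction hn : m_list.length - num generalizing num res with
  | zero =>
    rw [pvDiagLoop]
    have h : ¬ num < m_list.length := by omega
    simp [h]
    omega
  | succ n ih =>
    rw [pvDiagLoop]
    have h : num < m_list.length := by omega
    simp only [h, if_pos]
    rw [ih _ _ (by omega)]
    simp only [PySem.Set.mem_add]
    constructor
    · rintro ((hy | rfl) | ⟨i, h1, h2, rfl⟩)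
      · exact Or.inl hy
      · exact Or.inr ⟨num, le_refl _, h, rfl⟩
      · exact Or.inr ⟨i, by omega, h2, rfl⟩
    · rintro (hy | ⟨i, h1, h2, rfl⟩)
      · exact Or.inl (Or.inl hy)
      · rcases Nat.eq_or_lt_of_le h1 with rfl | hlt
        · exact Or.inl (Or.inr rfl)
        · exact Or.inr ⟨i, by omega, h2, rfl⟩

lemma diag_elem_eq (m_list : List (List String)) (i : Nat) (row : List String) (hrow : m_list[i]? = some row) :
    PySem.List.pyGetD (PySem.List.pyGetD m_list (i : Int) []) (i : Int) ""
      = PySem.List.pyGetD row (i : Int) "" := by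
  have : PySem.List.pyGetD m_list (i : Int) [] = row := by
    simp [PySem.List.pyGetD_natCast, List.getD, hrow]
  rw [this]

-- B's recursion checks every row k against column i+k
lemma pvMatchFrom_iff (var : String) (rows : List (List String)) (i : Nat) :
    pvMatchFrom var rows i = true ↔
      ∀ k, (h : k < rows.length) → PySem.List.pyGetD rows[k] ((i + k : Nat) : Int) "" = var := by
  induction rows generalizing i with
  | nil => simp [pvMatchFrom]
  | cons r rest ih =>
    simp only [pvMatchFrom, Bool.and_eq_true, beq_iff_eq, ih]
    constructor
    · rintro ⟨h0, hrest⟩ k hk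
      cases k with
      | zero => simpa using h0
      | succ k' =>
        have := hrest k' (by simpa using Nat.lt_of_succ_lt_succ hk)
        have harith : i + 1 + k' = i + (k' + 1) := by omega
        rw [harith] at this
        simpa using this
    · intro h
      refine ⟨by simpa using h 0 (by simp), fun k hk => ?_⟩
      have := h (k + 1) (by simpa using Nat.succ_lt_succ hk)
      have harith : i + (k + 1) = i + 1 + k := by omega
      rw [harith] at this
      simpa using this

-- ===== VERDICT (by name: the statement is the Claim_ definition above) =====
theorem diagonal_check_spec : Claim_equal_diagonal_check := by
  intro var m_list _ _
  unfold Spec_diagonal_check diagonal_check diagonal_check_alt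
  have key : PySem.Set.equal (pvDiagLoop m_list 0 PySem.Set.empty) (PySem.Set.ofList [var]) = true ↔
      ((!m_list.isEmpty) && pvMatchFrom var m_list 0) = true := by
    rw [PySem.Set.equal_iff]
    simp only [mem_pvDiagLoop, PySem.Set.empty, List.not_mem_nil, false_or,
      PySem.Set.mem_ofList, List.mem_singleton, Nat.zero_le, true_and,
      Bool.and_eq_true, Bool.not_eq_true', List.isEmpty_eq_false_iff,
      pvMatchFrom_iff]
    constructor
    · intro h
      have hne : m_list ≠ [] := by
        intro hnil
        have := (h var).mpr rfl
        rcases this with ⟨i, hi, _⟩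
        simp [hnil] at hi
      refine ⟨hne, ?_⟩
      intro k hk
      have := (h (PySem.List.pyGetD (PySem.List.pyGetD m_list (k : Int) []) (k : Int) "")).mp
        ⟨k, hk, rfl⟩
      rw [diag_elem_eq m_list k m_list[k] (List.getElem?_eq_getElem hk)] at this
      simpa using this
    · rintro ⟨hne, hall⟩ y
      constructor
      · rintro ⟨i, hi, rfl⟩
        have := hall i hi
        rw [diag_elem_eq m_list i _ (List.getElem?_eq_getElem hi)]
        simpa using this
      · rintro rfl
        have h0 : 0 < m_list.length := List.length_pos_iff.mpr hne
        refine ⟨0, h0, ?_⟩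
        rw [diag_elem_eq m_list 0 _ (List.getElem?_eq_getElem h0)]
        have := hall 0 h0
        simpa using this.symm
  by_cases hc : PySem.Set.equal (pvDiagLoop m_list 0 PySem.Set.empty) (PySem.Set.ofList [var]) = true
  · rw [if_pos hc, if_pos (key.mp hc)]
  · rw [if_neg hc, if_neg (fun h => hc (key.mpr h))]
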